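-- pv_equiv track=rewrite | github.com/tartaglialabIIT/catGRANULE2.0 | stringScalesFunctions.py | generate_strings
-- ===== SOURCE A (Python) =====
-- def generate_strings(original_string, substitution_chars):
--     modified_sequences = [original_string[:i] + new_char + original_string[i+1:]
--                           for i, original_char in enumerate(original_string)
--                           for new_char in substitution_chars
--                           if new_char != original_char]
--
--     old_characters = [original_char
--                       for i, original_char in enumerate(original_string)
--                       for new_char in substitution_chars
--                       if new_char != original_char]
--
--     positions = [i
--                  for i, original_char in enumerate(original_string)
--                  for new_char in substitution_chars
--                  if new_char != original_char]
--
--     new_characters = [new_char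
--                       for i, original_char in enumerate(original_string)
--                       for new_char in substitution_chars
--                       if new_char != original_char]
--
--     return modified_sequences, old_characters, positions, new_characters
-- ===== SOURCE B (Python) =====
-- def generate_strings(original_string, substitution_chars):
--     # Incremental prefix/rest walk (no index slicing, no enumerate): build one flat
--     # list of (modified, old, pos, new) records, then project it into the four lists.
--     records = []
--     prefix = ""
--     rest = original_string
--     i = 0
--     while rest:
--         oc, rest = rest[0], rest[1:]
--         records += [(prefix + nc + rest, oc, i, nc)
--                     for nc in substitution_chars if nc != oc]
--         prefix += oc
--         i += 1
--     return ([r[0] for r in records], [r[1] for r in records],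
--             [r[2] for r in records], [r[3] for r in records])
-- ===== Notes on version B (the rewrite author's own statement) =====
-- stated objective: alternative
-- what changed: B replaces A's four separate enumerate+slice comprehensions with an incremental prefix/rest walk (no index slicing, no enumerate) that builds one flat list of (modified, old, position, new) records and then projects it into the four result lists.
import Mathlib
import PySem

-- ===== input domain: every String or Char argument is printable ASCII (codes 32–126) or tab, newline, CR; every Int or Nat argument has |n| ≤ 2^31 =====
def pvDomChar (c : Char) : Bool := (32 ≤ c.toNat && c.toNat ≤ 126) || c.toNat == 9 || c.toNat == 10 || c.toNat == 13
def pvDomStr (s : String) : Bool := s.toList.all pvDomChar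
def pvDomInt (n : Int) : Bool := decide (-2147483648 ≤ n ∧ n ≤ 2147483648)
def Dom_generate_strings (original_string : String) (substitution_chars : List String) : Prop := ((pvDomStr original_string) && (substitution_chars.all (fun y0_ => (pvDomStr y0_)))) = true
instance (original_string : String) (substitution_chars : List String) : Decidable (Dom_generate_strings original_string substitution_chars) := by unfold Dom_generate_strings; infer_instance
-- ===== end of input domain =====

-- B builds one flat record list by an incremental prefix/rest walk and projects it;
-- A makes four separate enumerate+slice comprehensions (objective: alternative decomposition).


-- ===== PORT A =====
-- Port of A: four separate comprehensions (enumerate × substitution list, filtered), slices via PySem.List.slice.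
def generate_strings (original_string : String) (substitution_chars : List String) : List String × List String × List Int × List String :=
  let cs := original_string.toList
  let en := PySem.List.enumerate cs
  let modified_sequences := en.flatMap (fun p =>
    (substitution_chars.filter (fun nc => !(nc == String.ofList [p.2]))).map (fun nc =>
      String.ofList (PySem.List.slice cs none (some p.1)) ++ nc ++ String.ofList (PySem.List.slice cs (some (p.1 + 1)) none)))
  let old_characters := en.flatMap (fun p =>
    (substitution_chars.filter (fun nc => !(nc == String.ofList [p.2]))).map (fun _ => String.ofList [p.2]))
  let positions := en.flatMap (fun p =>
    (substitution_chars.filter (fun nc => !(nc == String.ofList [p.2]))).map (fun _ => p.1))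
  let new_characters := en.flatMap (fun p =>
    (substitution_chars.filter (fun nc => !(nc == String.ofList [p.2]))).map (fun nc => nc))
  (modified_sequences, old_characters, positions, new_characters)

-- ===== PORT B =====
-- Port of B's while loop: recursion on the remaining characters, carrying the growing prefix
-- and the position counter, producing the flat record list.
def gsRecords (subs : List String) (pre : List Char) (i : Int) : List Char → List (String × String × Int × String)
  | [] => []
  | c :: rs =>
    ((subs.filter (fun nc => !(nc == String.ofList [c]))).map (fun nc =>
        (String.ofList pre ++ nc ++ String.ofList rs, String.ofList [c], i, nc)))
    ++ gsRecords subs (pre ++ [c]) (i + 1) rs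

def generate_strings_alt (original_string : String) (substitution_chars : List String) : List String × List String × List Int × List String :=
  let recs := gsRecords substitution_chars [] 0 original_string.toList
  (recs.map (·.1), recs.map (·.2.1), recs.map (·.2.2.1), recs.map (·.2.2.2))

-- ===== PRECONDITION & SPEC =====
def Spec_generate_strings (original_string : String) (substitution_chars : List String) (out : List String × List String × List Int × List String) : Prop := out = generate_strings_alt original_string substitution_chars
instance (original_string : String) (substitution_chars : List String) (out : List String × List String × List Int × List String) : Decidable (Spec_generate_strings original_string substitution_chars out) := by unfold Spec_generate_strings; infer_instance

-- ===== CLAIM (what is proved, stated in full; the proofs are below) =====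
def Claim_equal_generate_strings : Prop := ∀ (original_string : String) (substitution_chars : List String), Dom_generate_strings original_string substitution_chars → Spec_generate_strings original_string substitution_chars (generate_strings original_string substitution_chars)

-- ===== LEMMAS AND PROOFS =====

-- B's record walk equals the flatMap over enumerate with full-string slices, for any split pre/rest.
theorem gsRecords_eq (subs : List String) : ∀ (rest pre : List Char),
    gsRecords subs pre (pre.length : Int) rest
    = (PySem.List.enumerate rest (pre.length : Int)).flatMap (fun p =>
        (subs.filter (fun nc => !(nc == String.ofList [p.2]))).map (fun nc =>
          (String.ofList (PySem.List.slice (pre ++ rest) none (some p.1)) ++ nc ++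
             String.ofList (PySem.List.slice (pre ++ rest) (some (p.1 + 1)) none),
           String.ofList [p.2], p.1, nc))) := by
  intro rest
  induction rest with
  | nil => intro pre; simp [gsRecords, PySem.List.enumerate_nil]
  | cons c rs ih =>
    intro pre
    have h1 : PySem.List.slice (pre ++ c :: rs) none (some (pre.length : Int)) = pre := by
      rw [PySem.List.slice_to_natCast]
      simp
    have h2 : PySem.List.slice (pre ++ c :: rs) (some ((pre.length : Int) + 1)) none = rs := by
      have : ((pre.length : Int) + 1) = (((pre.length + 1 : Nat)) : Int) := by push_cast; ring
      rw [this, PySem.List.slice_from_natCast]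
      have : pre ++ c :: rs = (pre ++ [c]) ++ rs := by simp
      rw [this, List.drop_append_of_le_length (by simp)]
      simp
    have hcast : (pre.length : Int) + 1 = (((pre ++ [c]).length : Nat) : Int) := by
      simp
    have ihx := ih (pre ++ [c])
    rw [gsRecords, PySem.List.enumerate_cons, List.flatMap_cons, h1, h2]
    congr 1
    rw [hcast] at *
    rw [ihx]
    simp

-- Projecting a component out of the flatMapped records gives the corresponding flatMap of maps.
theorem map_flatMap_map {α β γ δ : Type} (l : List α) (f : α → List β) (g : α → β → γ) (h : γ → δ) :
    ((l.flatMap (fun x => (f x).map (g x))).map h)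
    = l.flatMap (fun x => (f x).map (fun y => h (g x y))) := by
  simp only [List.map_flatMap, List.map_map]
  rfl

-- ===== VERDICT (by name: the statement is the Claim_ definition above) =====
theorem generate_strings_spec : Claim_equal_generate_strings := by
  intro s subs _
  unfold Spec_generate_strings generate_strings generate_strings_alt
  have := gsRecords_eq subs s.toList []
  simp only [List.nil_append, List.length_nil, Nat.cast_zero] at this
  rw [this]
  refine Prod.ext ?_ (Prod.ext ?_ (Prod.ext ?_ ?_)) <;>
    simp [map_flatMap_map]
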